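/- GENERATED by tools/from_farm_form.py from prooffarm-gif/accepted/DGifSlurp.4/Proof.lean (a worked proof of the farm's unit `DGifSlurp.4`,
   accepted by the verdict) — do not edit. -/
import Gif.Spec.Units.DGifSlurp_4
import Gif.Spec.AllSegs
import Gif.Spec.Proved.DGifSlurp_4_Lemmas

open X86 X86.User Asan ProgX.Base ProgX.Base.Spec Gif.Spec

/-!
  `DGifSlurp.4` (10A70BH … 10A777H and 10A914H … 10A923H, 24 + 4 instructions; dgif_lib.c:1207-1214): A BODY SEGMENT OF A PROTECTED
  FUNCTION: four checked loads, the three range tests of the image's size (`idiv`), and on a failed test the call of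
  DGifDecreaseImageCounter. The joint of the three failing arms, 10A914H, is not a cut of the design, so the unit makes it one of
  its own: the private assertion `seg4_Fail` (`At` + the last counted image) and two walks (Lemmas.lean), chained here.
-/

/-- Segment 4 of `DGifSlurp` takes `IM` at 10A70BH to `Sized` at 10A777H (the three tests passed) or to `Exit` at 10A8EDH (a test
failed, the slot was dropped by DGifDecreaseImageCounter). -/
theorem Gif.Spec.Proved.DGifSlurp_4_ok : Gif.Spec.DGifSlurp_4.Statement := by
  intro Lay hLay μ hμ u₀ hcode h_load8 h_load4 h_dec H rest frames F R Hc Fc m e ret v hat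
  -- 10A70BH … 10A777H | 10A914H (dgif_lib.c:1207-1212)
  refine (Gif.Spec.DGifSlurp_4.seg4_head Lay hLay μ hμ u₀ hcode h_load8 h_load4 H rest frames F R Hc Fc m e ret v hat).trans ?_
  intro v1 hv1
  rcases hv1 with hsized | hfail
  · -- 10A777H: the three tests passed
    exact ReachVia.done (Or.inl hsized)
  · -- 10A914H … the call of DGifDecreaseImageCounter … 10A8EDH (dgif_lib.c:1213-1214)
    refine (Gif.Spec.DGifSlurp_4.seg4_tail Lay hLay μ hμ u₀ hcode h_dec H rest frames F R Hc Fc e ret v1 hfail).mono ?_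
    intro w hw
    exact Or.inr hw
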